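-- pv_equiv track=rewrite | github.com/pypi-data/pypi-mirror-149 | packages/macal/Macal-3.1.0.tar.gz/Macal-3.1.0/src/macal/python384/macal_lexer.py | apply_escapes
-- ===== SOURCE A (Python) =====
-- def apply_escapes(source: str) -> str:
--     index = 0
--     length = len(source)
--     destination = "";
--     while index < length:
--         if source[index] == '\\' and index+1 < length:
--             if (source[index+1] in ['a','b','n','r','t','0']):
--                 if source[index+1] == 'a':
--                     destination=f"{destination}\a"
--                 elif source[index+1] == 'b':
--                     destination=f"{destination}\b"
--                 elif source[index+1] == 'n':
--                     destination=f"{destination}\n"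
--                 elif source[index+1] == 'r':
--                     destination=f"{destination}\r"
--                 elif source[index+1] == 't':
--                     destination=f"{destination}\t"
--                 else:
--                     destination=f"{destination}\0"
--             else:
--                 destination = f"{destination}{source[index+1]}"
--             index += 1
--         else:
--             destination=f"{destination}{source[index]}"
--         index += 1
--     return destination
-- ===== SOURCE B (Python) =====
-- ESCAPE_MAP = {'a': '\a', 'b': '\b', 'n': '\n', 'r': '\r', 't': '\t', '0': '\0'}
--
-- def apply_escapes(source: str) -> str:
--     # Staged algorithm: split the string on backslashes, then rejoin the parts.
--     # Each non-empty part after the first starts with the escaped character, which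
--     # is mapped through the table; an empty part means the backslash escaped another
--     # backslash (so the following part is taken literally after a '\') or, at the
--     # end, a lone trailing backslash kept as-is.
--     parts = source.split('\\')
--     pieces = [parts[0]]
--     i = 1
--     while i < len(parts):
--         p = parts[i]
--         if p:
--             pieces.append(ESCAPE_MAP.get(p[0], p[0]) + p[1:])
--             i += 1
--         elif i + 1 < len(parts):
--             pieces.append('\\' + parts[i + 1])
--             i += 2
--         else:
--             pieces.append('\\')
--             i += 1
--     return ''.join(pieces)
-- ===== Notes on version B (the rewrite author's own statement) =====
-- stated objective: alternative
-- what changed: Replaces A's character-by-character index scan with nested if-chain and repeated string concatenation by a staged algorithm: split the string on backslashes, map the first character of each subsequent non-empty part through a constant escape table (empty parts encode escaped or trailing backslashes), and join the pieces.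
import Mathlib
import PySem

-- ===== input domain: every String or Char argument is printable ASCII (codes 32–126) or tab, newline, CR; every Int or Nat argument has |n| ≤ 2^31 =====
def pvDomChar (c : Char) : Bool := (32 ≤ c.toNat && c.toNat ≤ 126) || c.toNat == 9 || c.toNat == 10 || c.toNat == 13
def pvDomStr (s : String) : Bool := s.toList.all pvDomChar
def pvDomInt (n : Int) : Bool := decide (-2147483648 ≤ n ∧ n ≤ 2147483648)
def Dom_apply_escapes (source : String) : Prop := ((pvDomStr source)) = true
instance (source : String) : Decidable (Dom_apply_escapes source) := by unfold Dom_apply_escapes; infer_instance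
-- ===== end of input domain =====

-- B replaces A's index scan, nested if-chain and repeated concatenation by a staged
-- algorithm: split on backslashes, map each part's leading character through a
-- constant escape table, and join the pieces (alternative decomposition).

-- ===== PORT A =====
-- A's while loop over indices; source[index] is always in range where read (the loop
-- guard and the `index+1 < length` test ensure it), so getD never sees its default.
def apply_escapes_loop (src : List Char) (index : Nat) (destination : List Char) : List Char :=
  if index < src.length then
    if src.getD index ' ' = '\\' ∧ index + 1 < src.length then
      let n := src.getD (index + 1) ' '
      let destination :=
        if n ∈ ['a', 'b', 'n', 'r', 't', '0'] then
          if n = 'a' then destination ++ ['\x07']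
          else if n = 'b' then destination ++ ['\x08']
          else if n = 'n' then destination ++ ['\n']
          else if n = 'r' then destination ++ ['\x0D']
          else if n = 't' then destination ++ ['\t']
          else destination ++ ['\x00']
        else destination ++ [n]
      apply_escapes_loop src (index + 2) destination
    else
      apply_escapes_loop src (index + 1) (destination ++ [src.getD index ' '])
  else destination
termination_by src.length - index

def apply_escapes (source : String) : String :=
  String.ofList (apply_escapes_loop source.toList 0 [])

-- ===== PORT B =====
def pvEscapeMap : PySem.Dict Char Char :=
  PySem.Dict.ofList [('a', '\x07'), ('b', '\x08'), ('n', '\n'), ('r', '\x0D'), ('t', '\t'), ('0', '\x00')]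

-- port of Python's source.split('\\'): the list of parts between backslashes
def pySplit : List Char → List (List Char)
  | [] => [[]]
  | c :: rest =>
    match pySplit rest with
    | [] => [[]]  -- unreachable: pySplit always returns a nonempty list
    | p :: ps => if c = '\\' then [] :: p :: ps else (c :: p) :: ps

-- Source B's rejoin loop over parts[1:]: a non-empty part maps its first character
-- through the table; an empty part means an escaped backslash (take the next part
-- literally after '\') or, last, a lone trailing backslash.
def apply_escapes_rejoin : List (List Char) → List Char
  | [] => []
  | p :: rest =>
    match p with
    | c :: cs => (pvEscapeMap.getD c c :: cs) ++ apply_escapes_rejoin rest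
    | [] =>
      match rest with
      | q :: rest' => ('\\' :: q) ++ apply_escapes_rejoin rest'
      | [] => ['\\']

def apply_escapes_alt (source : String) : String :=
  match pySplit source.toList with
  | p :: parts => String.ofList (p ++ apply_escapes_rejoin parts)
  | [] => ""  -- unreachable: pySplit always returns a nonempty list

-- ===== PRECONDITION & SPEC =====
def Spec_apply_escapes (source : String) (out : String) : Prop := out = apply_escapes_alt source
instance (source : String) (out : String) : Decidable (Spec_apply_escapes source out) := by unfold Spec_apply_escapes; infer_instance

-- ===== CLAIM =====
def Claim_equal_apply_escapes : Prop := ∀ (source : String), Dom_apply_escapes source → Spec_apply_escapes source (apply_escapes source)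

-- ===== LEMMAS AND PROOFS =====

-- direct one-pass characterisation of A's result, used as the bridge between both ports
def goA : List Char → List Char
  | [] => []
  | ch :: rest =>
    if ch = '\\' then
      match rest with
      | [] => [ch]
      | nxt :: rest' => pvEscapeMap.getD nxt nxt :: goA rest'
    else ch :: goA rest

theorem goA_other (ch : Char) (rest : List Char) (h : ch ≠ '\\') :
    goA (ch :: rest) = ch :: goA rest := by
  cases rest <;> simp [goA, h]

theorem escMap_miss (c : Char) (h1 : c ≠ 'a') (h2 : c ≠ 'b') (h3 : c ≠ 'n') (h4 : c ≠ 'r')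
    (h5 : c ≠ 't') (h6 : c ≠ '0') : pvEscapeMap.getD c c = c := by
  have hm : pvEscapeMap = PySem.Dict.mk
      [('a', '\x07'), ('b', '\x08'), ('n', '\n'), ('r', '\x0D'), ('t', '\t'), ('0', '\x00')] := by
    decide
  rw [hm]
  simp [PySem.Dict.getD, PySem.Dict.get?,
    Ne.symm h1, Ne.symm h2, Ne.symm h3, Ne.symm h4, Ne.symm h5, Ne.symm h6]

theorem apply_escapes_loop_eq (src : List Char) :
    ∀ (fuel index : Nat), src.length - index ≤ fuel → ∀ (dest : List Char),
      apply_escapes_loop src index dest = dest ++ goA (src.drop index) := by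
  intro fuel
  induction fuel with
  | zero =>
    intro index hle dest
    have h : ¬ index < src.length := by omega
    rw [apply_escapes_loop, if_neg h, List.drop_eq_nil_of_le (by omega), goA,
      List.append_nil]
  | succ m ih =>
    intro index hle dest
    by_cases h : index < src.length
    · have hdrop : src.drop index = src[index] :: src.drop (index + 1) :=
        List.drop_eq_getElem_cons h
      have hgetD : src.getD index ' ' = src[index] := List.getD_eq_getElem src ' ' h
      by_cases hb : src[index] = '\\' ∧ index + 1 < src.length
      · obtain ⟨hbs, hlt⟩ := hb
        have hdrop1 : src.drop (index + 1) = src[index + 1] :: src.drop (index + 2) :=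
          List.drop_eq_getElem_cons hlt
        have hgetD1 : src.getD (index + 1) ' ' = src[index + 1] :=
          List.getD_eq_getElem src ' ' hlt
        rw [apply_escapes_loop, if_pos h, if_pos (by rw [hgetD]; exact ⟨hbs, hlt⟩)]
        rw [ih (index + 2) (by omega)]
        rw [hdrop, hdrop1, hbs]
        have hgo : goA ('\\' :: src[index + 1] :: src.drop (index + 2)) =
            pvEscapeMap.getD (src[index + 1]) (src[index + 1]) ::
              goA (src.drop (index + 2)) := rfl
        rw [hgo]
        simp only [hgetD1]
        set n := src[index + 1] with hn
        by_cases hmem : n ∈ ['a', 'b', 'n', 'r', 't', '0']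
        · rw [if_pos hmem]
          simp only [List.mem_cons, List.not_mem_nil, or_false] at hmem
          rcases hmem with h' | h' | h' | h' | h' | h' <;> rw [h'] <;>
            simp [show pvEscapeMap.getD 'a' 'a' = '\x07' from by decide,
              show pvEscapeMap.getD 'b' 'b' = '\x08' from by decide,
              show pvEscapeMap.getD 'n' 'n' = '\n' from by decide,
              show pvEscapeMap.getD 'r' 'r' = '\x0D' from by decide,
              show pvEscapeMap.getD 't' 't' = '\t' from by decide,
              show pvEscapeMap.getD '0' '0' = '\x00' from by decide]
        · rw [if_neg hmem]
          simp only [List.mem_cons, List.not_mem_nil, or_false, not_or] at hmem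
          obtain ⟨h1, h2, h3, h4, h5, h6⟩ := hmem
          rw [escMap_miss n h1 h2 h3 h4 h5 h6]
          simp
      · rw [apply_escapes_loop, if_pos h, if_neg (by rw [hgetD]; exact hb)]
        rw [ih (index + 1) (by omega), hdrop, hgetD]
        by_cases hbs : src[index] = '\\'
        · have hge : ¬ index + 1 < src.length := fun hlt => hb ⟨hbs, hlt⟩
          have hnil : src.drop (index + 1) = ([] : List Char) :=
            List.drop_eq_nil_of_le (by omega)
          rw [hbs, hnil]
          simp [goA]
        · rw [goA_other _ _ hbs]
          simp
    · rw [apply_escapes_loop, if_neg h, List.drop_eq_nil_of_le (by omega), goA,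
        List.append_nil]

theorem pySplit_ne_nil (l : List Char) : pySplit l ≠ [] := by
  cases l with
  | nil => simp [pySplit]
  | cons c rest =>
    simp only [pySplit]
    cases pySplit rest with
    | nil => simp
    | cons p ps => split_ifs <;> simp

-- B's staged split-then-rejoin equals the one-pass characterisation of A
theorem rejoin_split_eq (n : Nat) :
    ∀ l : List Char, l.length ≤ n →
      (pySplit l).headI ++ apply_escapes_rejoin (pySplit l).tail = goA l := by
  induction n with
  | zero =>
    intro l hl
    have : l = [] := List.eq_nil_of_length_eq_zero (by omega)
    subst this
    simp [pySplit, apply_escapes_rejoin, goA]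
  | succ m ih =>
    intro l hl
    cases l with
    | nil => simp [pySplit, apply_escapes_rejoin, goA]
    | cons c rest =>
      by_cases hc : c = '\\'
      · subst hc
        cases rest with
        | nil =>
          simp [pySplit, apply_escapes_rejoin, goA]
        | cons c2 rest2 =>
          have ih2 := ih rest2 (by simp at hl ⊢; omega)
          by_cases hc2 : c2 = '\\'
          · subst hc2
            obtain ⟨p, ps, hps⟩ := List.exists_cons_of_ne_nil (pySplit_ne_nil rest2)
            have hsplit : pySplit ('\\' :: '\\' :: rest2) = [] :: [] :: p :: ps := by
              simp [pySplit, hps]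
            rw [hsplit]
            simp only [List.headI, List.tail, apply_escapes_rejoin]
            rw [hps] at ih2
            simp only [List.headI, List.tail] at ih2
            have hmap : pvEscapeMap.getD '\\' '\\' = '\\' := by decide
            simp [goA, hmap, ← ih2]
          · obtain ⟨p, ps, hps⟩ := List.exists_cons_of_ne_nil (pySplit_ne_nil rest2)
            have hsplit : pySplit ('\\' :: c2 :: rest2) = [] :: (c2 :: p) :: ps := by
              simp [pySplit, hps, hc2]
            rw [hsplit]
            simp only [List.headI, List.tail, apply_escapes_rejoin]
            rw [hps] at ih2
            simp only [List.headI, List.tail] at ih2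
            simp [goA, ← ih2]
      · obtain ⟨p, ps, hps⟩ := List.exists_cons_of_ne_nil (pySplit_ne_nil rest)
        have hsplit : pySplit (c :: rest) = (c :: p) :: ps := by
          simp [pySplit, hps, hc]
        have ih1 := ih rest (by simp at hl ⊢; omega)
        rw [hps] at ih1
        simp only [List.headI, List.tail] at ih1
        rw [hsplit, goA_other c rest hc]
        simp [← ih1]

-- ===== VERDICT =====
theorem apply_escapes_spec : Claim_equal_apply_escapes := by
  intro source _
  unfold Spec_apply_escapes apply_escapes apply_escapes_alt
  rw [apply_escapes_loop_eq source.toList source.toList.length 0 (by omega)]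
  obtain ⟨p, ps, hps⟩ := List.exists_cons_of_ne_nil (pySplit_ne_nil source.toList)
  rw [hps]
  have := rejoin_split_eq source.toList.length source.toList (le_refl _)
  rw [hps] at this
  simp only [List.headI, List.tail] at this
  simp [← this]
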